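-- pv_equiv track=rewrite | github.com/weechat/weechat | tools/check_curl_symbols.py | curl_version_to_str
-- ===== SOURCE A (Python) =====
-- def curl_version_to_str(version: int) -> str:
--     """
--     Convert Curl version as integer to string.
--
--     :param version: version as integer, eg: 481024 (0x075700)
--     :return: version as string, eg: "7.87.0"
--     """
--     if version == 0:
--         return "-"
--     result = ""
--     while version > 0:
--         result = str(version & 0xFF) + "." + result
--         version = version >> 8
--     return result.rstrip(".")
-- ===== SOURCE B (Python) =====
-- def curl_version_to_str(version: int) -> str:
--     """
--     Convert Curl version as integer to string.
--
--     :param version: version as integer, eg: 481024 (0x075700)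
--     :return: version as string, eg: "7.87.0"
--     """
--     if version == 0:
--         return "-"
--     n = (version.bit_length() + 7) // 8
--     return ".".join(str(b) for b in version.to_bytes(n, "big"))
-- ===== Notes on version B (the rewrite author's own statement) =====
-- stated objective: idiomatic
-- what changed: Replaces A's bit-shift/mask loop that prepends 'byte.' fragments and then rstrips the trailing dot by a closed-form byte count from bit_length, a single big-endian to_bytes decomposition, and one '.'.join formatting pass.
-- outside the precondition, e.g. on curl_version_to_str(-5): A returns '', B raises OverflowError
import Mathlib
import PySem

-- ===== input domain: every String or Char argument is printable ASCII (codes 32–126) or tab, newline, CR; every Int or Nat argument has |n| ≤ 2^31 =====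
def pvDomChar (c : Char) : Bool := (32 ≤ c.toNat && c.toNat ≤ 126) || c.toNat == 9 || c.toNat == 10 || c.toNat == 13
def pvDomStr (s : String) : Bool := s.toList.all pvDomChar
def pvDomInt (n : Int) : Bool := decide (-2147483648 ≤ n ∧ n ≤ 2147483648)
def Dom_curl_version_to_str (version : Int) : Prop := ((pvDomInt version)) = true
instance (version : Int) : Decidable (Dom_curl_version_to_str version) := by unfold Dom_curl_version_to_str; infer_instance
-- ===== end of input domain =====

-- B replaces A's shift/mask loop (prepend "byte." then rstrip the trailing dot) by a closed-form
-- byte count from bit_length, a big-endian byte decomposition, and one '.'.join — more idiomatic.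

-- ===== PORT A =====
-- hand port of str.rstrip(chars) (PySem has no chars-argument rstrip): drop trailing characters
-- that occur in `chars`; exact for any strings.
def pyRstrip (s : String) (chars : String) : String :=
  String.ofList ((List.dropWhile (fun c => chars.toList.contains c) s.toList.reverse).reverse)

-- the `while version > 0` loop of A, state = (version, result)
def curlLoopA (version : Int) (result : String) : String :=
  if 0 < version then
    curlLoopA (version >>> (8 : Nat))
      (PySem.Int.toStr (PySem.Int.band version 0xFF) ++ "." ++ result)
  else result
termination_by version.toNat
decreasing_by rw [Int.shiftRight_eq_div_pow]; omega

def curl_version_to_str (version : Int) : String :=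
  if version == 0 then "-"
  else pyRstrip (curlLoopA version "") "."

-- ===== PORT B =====
-- hand port of int.to_bytes(n, "big"): the n big-endian base-256 digits; exact for 0 ≤ v < 256^n
-- (Python raises OverflowError outside that range, which Pre_ excludes).
def toBytesBE (v : Int) (n : Nat) : List Int :=
  match n with
  | 0 => []
  | Nat.succ m => toBytesBE (PySem.Int.floordiv v 256) m ++ [PySem.Int.mod v 256]

def curl_version_to_str_alt (version : Int) : String :=
  if version == 0 then "-"
  else
    -- (version.bit_length() + 7) // 8 : both operands nonnegative, so Nat division is exact
    let n : Nat := (PySem.Int.bitLength version + 7) / 8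
    PySem.Str.join "." ((toBytesBE version n).map PySem.Int.toStr)

-- ===== PRECONDITION & SPEC =====
-- Pre_ excludes negative versions, on which A's return of "" is an accident of its loop never
-- running while B's to_bytes raises OverflowError; no real curl version is negative.
def Pre_curl_version_to_str (version : Int) : Prop := 0 ≤ version
instance (version : Int) : Decidable (Pre_curl_version_to_str version) := by
  unfold Pre_curl_version_to_str; infer_instance

def pvWitness_curl_version_to_str : Int := (481024)

def Spec_curl_version_to_str (version : Int) (out : String) : Prop :=
  out = curl_version_to_str_alt version
instance (version : Int) (out : String) : Decidable (Spec_curl_version_to_str version out) := by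
  unfold Spec_curl_version_to_str; infer_instance

-- ===== CLAIM (what is proved, stated in full; the proofs are below) =====
def Claim_equal_curl_version_to_str : Prop :=
  ∀ (version : Int), Dom_curl_version_to_str version → Pre_curl_version_to_str version →
    Spec_curl_version_to_str version (curl_version_to_str version)

-- ===== LEMMAS AND PROOFS =====

-- the mathematical big-endian byte list of v (empty for v ≤ 0)
def bytesM (v : Int) : List Int :=
  if 0 < v then bytesM (v / 256) ++ [v % 256] else []
termination_by v.toNat
decreasing_by omega

theorem band255_eq (v : Int) (h : 0 ≤ v) : PySem.Int.band v 255 = v % 256 := by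
  simp only [PySem.Int.band]
  rw [if_pos h, if_pos (by norm_num : (0:Int) ≤ 255)]
  have h1 : v.toNat &&& (255:Int).toNat = v.toNat % 256 := by
    have := Nat.and_two_pow_sub_one_eq_mod v.toNat 8
    norm_num at this ⊢
    exact this
  rw [h1]; omega

theorem shiftRight8_eq (v : Int) : v >>> (8 : Nat) = v / 256 := by
  rw [Int.shiftRight_eq_div_pow]; norm_num

theorem floordiv256_eq (v : Int) : PySem.Int.floordiv v 256 = v / 256 := by
  simp [PySem.Int.floordiv, Int.fdiv_eq_ediv]

theorem mod256_eq (v : Int) : PySem.Int.mod v 256 = v % 256 := by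
  simp [PySem.Int.mod, Int.fmod_eq_emod]

theorem bytesM_mem (v : Int) : ∀ b ∈ bytesM v, 0 ≤ b ∧ b < 256 := by
  induction v using bytesM.induct with
  | case1 v hpos ih =>
    rw [bytesM, if_pos hpos]
    intro b hb
    rcases List.mem_append.mp hb with h | h
    · exact ih b h
    · simp at h; omega
  | case2 v hneg =>
    rw [bytesM, if_neg hneg]; intro b hb; simp at hb

set_option maxRecDepth 8192 in
theorem toChars_byte_fin : ∀ i : Fin 256,
    PySem.Int.toChars ((i : Nat) : Int) ≠ [] ∧ '.' ∉ PySem.Int.toChars ((i : Nat) : Int) := by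
  decide

theorem toChars_byte (b : Int) (h0 : 0 ≤ b) (h1 : b < 256) :
    PySem.Int.toChars b ≠ [] ∧ '.' ∉ PySem.Int.toChars b := by
  have h := toChars_byte_fin ⟨b.toNat, by omega⟩
  have hb : ((b.toNat : Nat) : Int) = b := by omega
  simpa [hb] using h

-- A's loop produces the "byte." fragments of bytesM, then the seed
theorem curlLoopA_eq (v : Int) (r : String) :
    0 ≤ v → (curlLoopA v r).toList
      = (bytesM v).flatMap (fun b => PySem.Int.toChars b ++ ['.']) ++ r.toList := by
  induction v, r using curlLoopA.induct with
  | case1 v r hpos ih =>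
    intro h
    rw [curlLoopA, if_pos hpos, bytesM, if_pos hpos]
    rw [ih (by rw [shiftRight8_eq]; omega)]
    rw [shiftRight8_eq]
    simp [String.toList_append, band255_eq v h, PySem.Int.toList_toStr]
  | case2 v r hneg =>
    intro _
    rw [curlLoopA, if_neg hneg, bytesM, if_neg hneg]
    simp

-- B's to_bytes at the exact byte count is bytesM
theorem toBytesBE_eq (n : Nat) : ∀ v : Int, 0 < v → v < 256 ^ n → 256 ^ (n - 1) ≤ v →
    toBytesBE v n = bytesM v := by
  induction n with
  | zero => intro v hv hlt _; norm_num at hlt; omega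
  | succ m ih =>
    intro v hv hlt hle
    rw [toBytesBE, floordiv256_eq, mod256_eq, bytesM, if_pos hv]
    congr 1
    rcases Nat.eq_zero_or_pos m with hm | hm
    · subst hm
      have hz : v / 256 = 0 := by norm_num at hlt; omega
      rw [hz, toBytesBE, bytesM, if_neg (by norm_num)]
    · obtain ⟨k, rfl⟩ := Nat.exists_eq_succ_of_ne_zero (Nat.pos_iff_ne_zero.mp hm)
      have hle' : (256:Int) ^ (k + 1) ≤ v := by simpa using hle
      have h256 : (256:Int) ≤ 256 ^ (k + 1) := by
        calc (256:Int) = 256 ^ 1 := (pow_one _).symm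
          _ ≤ 256 ^ (k + 1) := pow_le_pow_right₀ (by norm_num) (by omega)
      apply ih
      · have h1 : (1:Int) ≤ v / 256 := by
          rw [Int.le_ediv_iff_mul_le (by norm_num)]
          linarith
        omega
      · rw [Int.ediv_lt_iff_lt_mul (by norm_num)]
        calc v < 256 ^ (k + 1 + 1) := hlt
          _ = 256 ^ (k + 1) * 256 := by ring
      · rw [Int.le_ediv_iff_mul_le (by norm_num)]
        calc (256:Int) ^ (k + 1 - 1) * 256 = 256 ^ (k + 1) := by
              rw [Nat.add_sub_cancel, ← pow_succ]
          _ ≤ v := hle'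

theorem bitLen_bounds (v : Int) (h : 0 < v) :
    v < 256 ^ ((PySem.Int.bitLength v + 7) / 8)
      ∧ 256 ^ ((PySem.Int.bitLength v + 7) / 8 - 1) ≤ v := by
  set b := PySem.Int.bitLength v with hb
  set n := (b + 7) / 8 with hn
  have hub : v.natAbs < 2 ^ b := PySem.Int.lt_two_pow_bitLength v
  have hlb : 2 ^ (b - 1) ≤ v.natAbs := PySem.Int.two_pow_bitLength_le v (by omega)
  have hb1 : 1 ≤ b := by
    rcases Nat.eq_zero_or_pos b with h0b | h0b
    · rw [h0b] at hub; norm_num at hub; omega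
    · exact h0b
  have hva : ((v.natAbs : Nat) : Int) = v := Int.natAbs_of_nonneg (le_of_lt h)
  constructor
  · have hpow : (2:Nat) ^ b ≤ 256 ^ n := by
      calc (2:Nat) ^ b ≤ 2 ^ (8 * n) := Nat.pow_le_pow_right (by norm_num) (by omega)
        _ = 256 ^ n := by rw [pow_mul]; norm_num
    have hnat : v.natAbs < 256 ^ n := lt_of_lt_of_le hub hpow
    have hint : ((v.natAbs : Nat) : Int) < (((256 ^ n : Nat) : Nat) : Int) := Int.ofNat_lt.mpr hnat
    rw [hva] at hint
    push_cast at hint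
    exact hint
  · have hpow : (2:Nat) ^ (8 * (n - 1)) ≤ 2 ^ (b - 1) :=
      Nat.pow_le_pow_right (by norm_num) (by omega)
    have hnat : 256 ^ (n - 1) ≤ v.natAbs := by
      calc (256:Nat) ^ (n - 1) = 2 ^ (8 * (n - 1)) := by rw [pow_mul]; norm_num
        _ ≤ 2 ^ (b - 1) := hpow
        _ ≤ v.natAbs := hlb
    have hint : (((256 ^ (n - 1) : Nat) : Nat) : Int) ≤ ((v.natAbs : Nat) : Int) := Int.ofNat_le.mpr hnat
    rw [hva] at hint
    push_cast at hint
    exact hint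

theorem flat_eq_intercalate (bs : List Int) (hne : bs ≠ []) :
    bs.flatMap (fun b => PySem.Int.toChars b ++ ['.'])
      = List.intercalate ['.'] (bs.map PySem.Int.toChars) ++ ['.'] := by
  induction bs with
  | nil => simp at hne
  | cons b bs ih =>
    cases bs with
    | nil => simp [List.intercalate]
    | cons b' bs' =>
      rw [List.flatMap_cons, ih (by simp)]
      simp [List.intercalate]

theorem intercalate_cons₂ (sep x y : List Char) (l : List (List Char)) :
    List.intercalate sep (x :: y :: l) = x ++ sep ++ List.intercalate sep (y :: l) := by
  simp [List.intercalate]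

theorem intercalate_append_single (sep : List Char) (l : List (List Char)) (x : List Char)
    (hl : l ≠ []) :
    List.intercalate sep (l ++ [x]) = List.intercalate sep l ++ sep ++ x := by
  induction l with
  | nil => simp at hl
  | cons y l ih =>
    cases l with
    | nil => simp [List.intercalate]
    | cons z l' =>
      conv_rhs => rw [intercalate_cons₂]
      rw [List.cons_append, List.cons_append, intercalate_cons₂, ← List.cons_append,
        ih (by simp)]
      simp [List.append_assoc]

theorem rstrip_drop_dot (t : List Char) :
    (List.dropWhile (fun c => [ '.' ].contains c) (t ++ ['.']).reverse).reverse
      = (List.dropWhile (fun c => [ '.' ].contains c) t.reverse).reverse := by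
  simp

theorem rstrip_keep (t cs : List Char) (hne : cs ≠ []) (hd : '.' ∉ cs) :
    (List.dropWhile (fun c => [ '.' ].contains c) (t ++ cs).reverse).reverse = t ++ cs := by
  obtain ⟨c0, cs', hrev⟩ := List.exists_cons_of_ne_nil
    (show cs.reverse ≠ [] by simpa using hne)
  have hc0 : c0 ∈ cs := by
    rw [← List.mem_reverse, hrev]; exact List.mem_cons_self
  have hp : ([ '.' ].contains c0) = false := by
    simp only [List.contains_eq_mem, List.mem_singleton, decide_eq_false_iff_not]
    intro hcc; exact hd (hcc ▸ hc0)
  have hdw : List.dropWhile (fun c => [ '.' ].contains c) (t ++ cs).reverse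
      = (t ++ cs).reverse := by
    rw [List.reverse_append, hrev, List.cons_append, List.dropWhile_cons, hp]
    simp
  rw [hdw, List.reverse_reverse]

theorem rstrip_flat (bs : List Int) (hne : bs ≠ []) (hgood : ∀ b ∈ bs, 0 ≤ b ∧ b < 256) :
    (List.dropWhile (fun c => [ '.' ].contains c)
        (bs.flatMap (fun b => PySem.Int.toChars b ++ ['.'])).reverse).reverse
      = List.intercalate ['.'] (bs.map PySem.Int.toChars) := by
  rw [flat_eq_intercalate _ hne, rstrip_drop_dot]
  obtain rfl | ⟨l, blast, rfl⟩ := bs.eq_nil_or_concat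
  · exact absurd rfl hne
  · simp only [List.concat_eq_append] at hne hgood ⊢
    have hgb := hgood blast (by simp)
    have hgc := toChars_byte blast hgb.1 hgb.2
    rcases eq_or_ne l [] with rfl | hl
    · simp only [List.nil_append, List.map_cons, List.map_nil, List.intercalate]
      simpa [List.intercalate] using rstrip_keep [] (PySem.Int.toChars blast) hgc.1 hgc.2
    · rw [List.map_append, List.map_singleton,
        intercalate_append_single _ _ _ (by simpa using hl)]
      have := rstrip_keep (List.intercalate ['.'] (l.map PySem.Int.toChars) ++ ['.'])
        (PySem.Int.toChars blast) hgc.1 hgc.2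
      simpa [List.append_assoc] using this

-- ===== VERDICT (by name: the statement is the Claim_ definition above) =====
theorem curl_version_to_str_spec : Claim_equal_curl_version_to_str := by
  intro v _ hpre
  unfold Spec_curl_version_to_str
  by_cases hz : v = 0
  · subst hz; rfl
  · have hv : 0 < v := lt_of_le_of_ne hpre (Ne.symm hz)
    have hbeq : (v == 0) = false := by simpa using hz
    obtain ⟨hlt, hle⟩ := bitLen_bounds v hv
    have hbs : bytesM v ≠ [] := by rw [bytesM, if_pos hv]; simp
    apply String.toList_inj.mp
    rw [curl_version_to_str, curl_version_to_str_alt]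
    simp only [hbeq, Bool.false_eq_true, if_false]
    rw [toBytesBE_eq _ v hv hlt hle]
    rw [pyRstrip, String.toList_ofList]
    rw [curlLoopA_eq v "" (le_of_lt hv)]
    have hdot : (".".toList) = ['.'] := rfl
    simp only [hdot, show ("".toList : List Char) = [] from rfl, List.append_nil]
    rw [rstrip_flat (bytesM v) hbs (bytesM_mem v)]
    rw [PySem.Str.toList_join]
    simp [PySem.Chars.join, List.map_map, Function.comp_def, PySem.Int.toList_toStr, hdot]
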